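-- pv_equiv track=rewrite | github.com/SKam23/UCB-CS61A | projects/cats/cats.py | shifty_shifts
-- ===== SOURCE A (Python) =====
-- def shifty_shifts(start, goal, limit):
--     """A diff function for autocorrect that determines how many letters
--     in START need to be substituted to create GOAL, then adds the difference in
--     their lengths.
--     """
--     # BEGIN PROBLEM 6
--     if limit < 0:
--         return 0
--     elif len(start)==0 or len(goal)==0:
--         return len(start) +len(goal)
--     elif start[0]!=goal[0]:
--         return 1+shifty_shifts(start[1:],goal[1:],limit -1)
--     else:
--         return shifty_shifts(start[1:],goal[1:],limit)
-- ===== SOURCE B (Python) =====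
-- def shifty_shifts(start, goal, limit):
--     if limit < 0:
--         return 0
--     m = sum(1 for a, b in zip(start, goal) if a != b)
--     if m > limit:
--         return limit + 1
--     return m + abs(len(start) - len(goal))
-- ===== Notes on version B (the rewrite author's own statement) =====
-- stated objective: faster
-- what changed: Replaced the limit-threading recursion (which slices start[1:]/goal[1:] at every step) with a single zip pass counting mismatches plus a closed-form branch: limit+1 on overflow, else mismatches + length difference.
import Mathlib
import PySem

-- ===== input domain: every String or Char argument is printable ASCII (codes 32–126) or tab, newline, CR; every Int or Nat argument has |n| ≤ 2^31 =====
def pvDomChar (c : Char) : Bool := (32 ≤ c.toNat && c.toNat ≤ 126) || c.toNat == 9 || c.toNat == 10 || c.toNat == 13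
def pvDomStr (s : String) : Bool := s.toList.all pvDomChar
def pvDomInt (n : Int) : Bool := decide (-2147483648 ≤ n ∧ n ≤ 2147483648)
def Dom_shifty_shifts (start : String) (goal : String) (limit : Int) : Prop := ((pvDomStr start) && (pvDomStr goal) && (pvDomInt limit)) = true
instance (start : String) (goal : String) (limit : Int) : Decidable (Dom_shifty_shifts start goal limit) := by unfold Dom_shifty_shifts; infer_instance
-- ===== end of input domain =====

-- B replaces A's limit-threading recursion with a single zip pass counting mismatches plus a closed-form branch.

-- ===== PORT A =====
-- literal recursion on the two character lists (start[0] / start[1:] become head / tail)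
def shiftyShiftsRec : List Char → List Char → Int → Int
  | s, g, limit =>
    if limit < 0 then 0
    else
      match s, g with
      | [], g => (g.length : Int)                    -- len(start)==0: len(start)+len(goal) = len(goal)
      | s, [] => (s.length : Int)                    -- len(goal)==0: len(start)+len(goal) = len(start)
      | a :: s', b :: g' =>
        if a ≠ b then 1 + shiftyShiftsRec s' g' (limit - 1)
        else shiftyShiftsRec s' g' limit

def shifty_shifts (start : String) (goal : String) (limit : Int) : Int :=
  shiftyShiftsRec start.toList goal.toList limit

-- ===== PORT B =====
def shifty_shifts_alt (start : String) (goal : String) (limit : Int) : Int :=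
  if limit < 0 then 0
  else
    let m : Int := ((start.toList.zip goal.toList).countP (fun p => p.1 != p.2) : Int)
    if m > limit then limit + 1
    else m + |(start.toList.length : Int) - (goal.toList.length : Int)|

-- ===== PRECONDITION & SPEC =====
def Spec_shifty_shifts (start : String) (goal : String) (limit : Int) (out : Int) : Prop := out = shifty_shifts_alt start goal limit
instance (start : String) (goal : String) (limit : Int) (out : Int) : Decidable (Spec_shifty_shifts start goal limit out) := by unfold Spec_shifty_shifts; infer_instance

-- ===== CLAIM (what is proved, stated in full; the proofs are below) =====
def Claim_equal_shifty_shifts : Prop := ∀ (start : String) (goal : String) (limit : Int), Dom_shifty_shifts start goal limit → Spec_shifty_shifts start goal limit (shifty_shifts start goal limit)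

-- ===== LEMMAS AND PROOFS =====
-- For 0 ≤ limit, A's recursion equals B's closed form: if the mismatch count m over the
-- zipped prefixes exceeds limit the recursion stops at limit+1, otherwise it returns
-- m plus the length difference.
lemma shiftyShiftsRec_closed (s : List Char) : ∀ (g : List Char) (limit : Int), 0 ≤ limit →
    shiftyShiftsRec s g limit =
      (if (((s.zip g).countP (fun p => p.1 != p.2) : Int)) > limit then limit + 1
       else (((s.zip g).countP (fun p => p.1 != p.2) : Int)) + |(s.length : Int) - (g.length : Int)|) := by
  induction s with
  | nil =>
    intro g limit h
    simp [shiftyShiftsRec, not_lt.mpr h]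
  | cons a s' ih =>
    intro g limit h
    cases g with
    | nil =>
      simp [shiftyShiftsRec, not_lt.mpr h]
      rw [abs_of_nonneg (by positivity)]
    | cons b g' =>
      by_cases hab : a = b
      · subst hab
        simp only [shiftyShiftsRec, if_neg (not_lt.mpr h), ne_eq, not_true_eq_false, if_false,
          List.zip_cons_cons, List.countP_cons, bne_self_eq_false, List.length_cons,
          ih g' limit h]
        push_cast
        ring_nf
      · have hne : (a != b) = true := by simp [hab]
        by_cases hl : limit = 0
        · subst hl
          have h0 : shiftyShiftsRec s' g' (-1) = 0 := by rw [shiftyShiftsRec.eq_def]; norm_num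
          simp only [shiftyShiftsRec, ne_eq, hab, not_false_eq_true, if_true,
            List.zip_cons_cons, List.countP_cons, hne]
          rw [if_neg (by norm_num), if_pos (by push_cast; omega)]
          have he : (0 : Int) - 1 = -1 := by norm_num
          rw [he, h0]
          norm_num
        · have h1 : 0 ≤ limit - 1 := by omega
          simp only [shiftyShiftsRec, if_neg (not_lt.mpr h), ne_eq, hab, not_false_eq_true,
            if_true, ih g' (limit - 1) h1, List.zip_cons_cons, List.countP_cons, hne,
            List.length_cons]
          split_ifs <;> push_cast <;> ring_nf <;> omega

-- ===== VERDICT (by name: the statement is the Claim_ definition above) =====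
theorem shifty_shifts_spec : Claim_equal_shifty_shifts := by
  intro start goal limit _
  unfold Spec_shifty_shifts shifty_shifts shifty_shifts_alt
  by_cases h : limit < 0
  · rw [shiftyShiftsRec.eq_def]
    simp [h]
  · push_neg at h
    simp only [if_neg (not_lt.mpr h)]
    exact shiftyShiftsRec_closed start.toList goal.toList limit h
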